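-- pv_equiv track=rewrite | github.com/arifgorkemozer/docspider | pipelines/step5_compare_results.py | find_all_keywords_in_mongo_result
-- ===== SOURCE A (Python) =====
-- def find_all_keywords_in_mongo_result(mongodb_result_str):
--     JSON_PUNC_START_CHARS = ['[','{']
--     JSON_PUNC_END_CHARS = [']','}']
--     JSON_PUNC_CHARS = [' ', ','] + JSON_PUNC_START_CHARS + JSON_PUNC_END_CHARS
--
--     keywords = set()
--     i = 0
--     j = 0
--
--     while i < len(mongodb_result_str) and j < len(mongodb_result_str):
--         # find occurence of :
--         while j < len(mongodb_result_str) and mongodb_result_str[j] != ':':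
--             j += 1
--
--         # wrap the keyword with " if it is not wrapped - for proper json format
--         if j < len(mongodb_result_str) - 1 and mongodb_result_str[j-1] != '"':
--             i = j
--
--             abort = False
--
--             # find the beginning of keyword
--             while i > 0 and (mongodb_result_str[i] not in JSON_PUNC_CHARS):
--                 if mongodb_result_str[i] == '\'':
--                     abort = True
--                     break
--
--                 i -= 1
--
--             if not abort:
--                 i += 1
--                 keyword = mongodb_result_str[i:j]
--                 keywords.add(keyword)
--
--         i = j
--         j = j + 1
--
--     return list(keywords)
-- ===== SOURCE B (Python) =====
-- def find_all_keywords_in_mongo_result(mongodb_result_str):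
--     s = mongodb_result_str
--     keywords = set()
--     last_punc = 0   # index of the most recent delimiter char
--     last_quote = 0  # index of the most recent "'"
--     for j, c in enumerate(s):
--         if c in " ,[{]}":
--             last_punc = j
--         elif c == "'":
--             last_quote = j
--         elif c == ':' and j < len(s) - 1 and s[j - 1] != '"':
--             if last_quote <= last_punc:
--                 keywords.add(s[last_punc + 1:j])
--     return list(keywords)
-- ===== Notes on version B (the rewrite author's own statement) =====
-- stated objective: faster
-- what changed: A re-finds the start of every keyword with a per-colon backward scan; B makes a single forward pass that maintains the index of the last delimiter and of the last quote, so each colon is handled without rescanning.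
import Mathlib
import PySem

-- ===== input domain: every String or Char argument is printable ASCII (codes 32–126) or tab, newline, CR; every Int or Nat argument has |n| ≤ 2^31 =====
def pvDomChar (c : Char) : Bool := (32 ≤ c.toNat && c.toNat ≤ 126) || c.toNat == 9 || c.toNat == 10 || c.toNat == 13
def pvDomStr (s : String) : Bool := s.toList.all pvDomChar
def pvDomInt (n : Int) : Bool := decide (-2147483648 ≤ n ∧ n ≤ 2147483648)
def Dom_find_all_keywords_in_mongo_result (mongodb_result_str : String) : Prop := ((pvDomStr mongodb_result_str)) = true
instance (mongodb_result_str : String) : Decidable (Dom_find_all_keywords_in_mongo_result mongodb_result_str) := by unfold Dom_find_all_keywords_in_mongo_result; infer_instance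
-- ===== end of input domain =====

-- B replaces A's per-colon backward scan with a single forward pass that keeps the
-- positions of the last delimiter and the last quote (objective: faster, no per-colon rescans);
-- outputs are Python list(set) and are compared as sets.

-- ===== PORT A =====
-- JSON_PUNC_CHARS = [' ', ','] + ['[','{'] + [']','}']
def pvPunc : List Char := [' ', ','] ++ (['[', '{'] ++ ([']', '}'] : List Char))

-- inner `while j < len and s[j] != ':'` loop (returns the final j)
def pvFindColon (cs : List Char) (j : Nat) : Nat :=
  if h : j < cs.length ∧ cs.getD j ' ' ≠ ':' then pvFindColon cs (j + 1) else j
termination_by cs.length - j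
decreasing_by omega

-- backward `while i > 0 and s[i] not in JSON_PUNC_CHARS` loop: final i and the abort flag
-- (every index reached here is in range in A, so plain getD is exact)
def pvBackA (cs : List Char) (i : Nat) : Nat × Bool :=
  if h : 0 < i ∧ cs.getD i ' ' ∉ pvPunc then
    if cs.getD i ' ' = '\'' then (i, true)
    else pvBackA cs (i - 1)
  else (i, false)
termination_by i
decreasing_by omega

-- j never moves left (cited by pvOuterA's termination proof)
theorem pvFindColon_ge (cs : List Char) (j : Nat) : j ≤ pvFindColon cs j := by
  rw [pvFindColon]
  split
  · have := pvFindColon_ge cs (j + 1); omega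
  · omega
termination_by cs.length - j
decreasing_by omega

-- outer while loop of A, state (i, j, keywords)
def pvOuterA (cs : List Char) (i j : Nat) (kws : PySem.Set String) : PySem.Set String :=
  if h : i < cs.length ∧ j < cs.length then
    let j' := pvFindColon cs j
    let kws' :=
      if j' + 1 < cs.length ∧ PySem.List.pyGet? cs ((j' : Int) - 1) ≠ some '"' then
        let r := pvBackA cs j'
        if ¬ r.2 then
          kws.add (String.ofList (PySem.List.slice cs (some ((r.1 + 1 : Nat) : Int)) (some (j' : Int))))
        else kws
      else kws
    pvOuterA cs j' (j' + 1) kws'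
  else kws
termination_by cs.length - j
decreasing_by
  have := pvFindColon_ge cs j
  omega

def find_all_keywords_in_mongo_result (mongodb_result_str : String) : List String :=
  pvOuterA mongodb_result_str.toList 0 0 PySem.Set.empty

-- ===== PORT B =====
-- B's single forward pass `for j, c in enumerate(s)` with state (last_punc, last_quote, keywords);
-- `s[j - 1]` is Python indexing (j = 0 reads the last character), hence pyGet?
def pvLoopB (cs : List Char) (j : Nat) (lp lq : Int) (kws : PySem.Set String) : PySem.Set String :=
  if h : j < cs.length then
    let c := cs.getD j ' '
    if c ∈ pvPunc then pvLoopB cs (j + 1) (j : Int) lq kws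
    else if c = '\'' then pvLoopB cs (j + 1) lp (j : Int) kws
    else if c = ':' ∧ j + 1 < cs.length ∧ PySem.List.pyGet? cs ((j : Int) - 1) ≠ some '"' then
      if lq ≤ lp then
        pvLoopB cs (j + 1) lp lq
          (kws.add (String.ofList (PySem.List.slice cs (some (lp + 1)) (some (j : Int)))))
      else pvLoopB cs (j + 1) lp lq kws
    else pvLoopB cs (j + 1) lp lq kws
  else kws
termination_by cs.length - j
decreasing_by all_goals omega

def find_all_keywords_in_mongo_result_alt (mongodb_result_str : String) : List String :=
  pvLoopB mongodb_result_str.toList 0 0 0 PySem.Set.empty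

-- ===== PRECONDITION & SPEC =====
def Spec_find_all_keywords_in_mongo_result (mongodb_result_str : String) (out : List String) : Prop := out = find_all_keywords_in_mongo_result_alt mongodb_result_str
instance (mongodb_result_str : String) (out : List String) : Decidable (Spec_find_all_keywords_in_mongo_result mongodb_result_str out) := by unfold Spec_find_all_keywords_in_mongo_result; infer_instance

-- ===== CLAIM (what is proved, stated in full; the proofs are below) =====
def Claim_equal_find_all_keywords_in_mongo_result : Prop := ∀ (mongodb_result_str : String), Dom_find_all_keywords_in_mongo_result mongodb_result_str → Spec_find_all_keywords_in_mongo_result mongodb_result_str (find_all_keywords_in_mongo_result mongodb_result_str)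

-- ===== LEMMAS AND PROOFS =====
-- index (as Int) of the last delimiter among positions < j (-1 if none)
def pvLp (cs : List Char) : Nat → Int
  | 0 => -1
  | j + 1 => if cs.getD j ' ' ∈ pvPunc then (j : Int) else pvLp cs j

-- index of the last `'` among positions 1 ≤ k < j (-1 if none; A never tests position 0)
def pvLqA (cs : List Char) : Nat → Int
  | 0 => -1
  | j + 1 => if cs.getD j ' ' = '\'' ∧ 0 < j then (j : Int) else pvLqA cs j

-- index of the last `'` among positions k < j, as B tracks it (-1 if none)
def pvLq (cs : List Char) : Nat → Int
  | 0 => -1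
  | j + 1 => if cs.getD j ' ' = '\'' then (j : Int) else pvLq cs j

theorem pvLp_bounds (cs : List Char) (j : Nat) : -1 ≤ pvLp cs j ∧ pvLp cs j < (j : Int) := by
  induction j with
  | zero => simp [pvLp]
  | succ q ih => rw [pvLp]; split <;> push_cast <;> omega

theorem pvLqA_bounds (cs : List Char) (j : Nat) : -1 ≤ pvLqA cs j ∧ pvLqA cs j < (j : Int) := by
  induction j with
  | zero => simp [pvLqA]
  | succ q ih => rw [pvLqA]; split <;> push_cast <;> omega

theorem pvLqA_pos (cs : List Char) (j : Nat) : pvLqA cs j = -1 ∨ 1 ≤ pvLqA cs j := by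
  induction j with
  | zero => simp [pvLqA]
  | succ q ih => rw [pvLqA]; split <;> [skip; exact ih]; rename_i h; right; exact_mod_cast h.2

theorem pvLq_eq (cs : List Char) (j : Nat) :
    pvLq cs j = if cs.getD 0 ' ' = '\'' ∧ 0 < j then max (pvLqA cs j) 0 else pvLqA cs j := by
  induction j with
  | zero => simp [pvLq, pvLqA]
  | succ q ih =>
    have eB : pvLq cs (q + 1) = if cs.getD q ' ' = '\'' then (q : Int) else pvLq cs q := rfl
    have eA : pvLqA cs (q + 1) = if cs.getD q ' ' = '\'' ∧ 0 < q then (q : Int) else pvLqA cs q := rfl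
    by_cases h0' : cs.getD 0 ' ' = '\''
    · rw [if_pos ⟨h0', Nat.succ_pos q⟩, eB, eA]
      by_cases h : cs.getD q ' ' = '\''
      · rw [if_pos h]
        rcases Nat.eq_zero_or_pos q with h0 | h0
        · subst h0
          rw [if_neg (fun hh => absurd hh.2 (Nat.lt_irrefl 0))]
          simp [pvLqA]
        · rw [if_pos ⟨h, h0⟩]; omega
      · rcases Nat.eq_zero_or_pos q with h0 | h0
        · subst h0; exact absurd h0' h
        · rw [if_neg h, if_neg (fun hh => h hh.1), ih, if_pos ⟨h0', h0⟩]
    · rw [if_neg (fun hh => h0' hh.1), eB, eA]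
      by_cases h : cs.getD q ' ' = '\''
      · rcases Nat.eq_zero_or_pos q with h0 | h0
        · subst h0; exact absurd h h0'
        · rw [if_pos h, if_pos ⟨h, h0⟩]
      · rw [if_neg h, if_neg (fun hh => h hh.1), ih, if_neg (fun hh => h0' hh.1)]

-- the state B keeps (clamped at 0) forgets exactly the position-0 quote A never tests
theorem pvLq_max (cs : List Char) (j : Nat) : max (pvLq cs j) 0 = max (pvLqA cs j) 0 := by
  rw [pvLq_eq]; split <;> omega

-- A's backward scan from p computes exactly the forward-maintained (last delimiter, last quote) data
theorem pvBackA_eq (cs : List Char) (p : Nat) (hp : p < cs.length) :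
    pvBackA cs p = if pvLp cs (p + 1) < pvLqA cs (p + 1)
      then ((pvLqA cs (p + 1)).toNat, true) else ((pvLp cs (p + 1)).toNat, false) := by
  induction p with
  | zero =>
    rw [pvBackA]
    have h1 : pvLqA cs (0 + 1) = -1 := by simp [pvLqA]
    have h2 := pvLp_bounds cs (0 + 1)
    rw [dif_neg (fun h => Nat.lt_irrefl 0 h.1), h1, if_neg (by omega)]
    congr 1
    omega
  | succ q ih =>
    have hq := pvLqA_bounds cs (q + 1)
    have hp2 := pvLp_bounds cs (q + 1)
    rw [pvBackA]
    by_cases hpunc : cs.getD (q + 1) ' ' ∈ pvPunc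
    · have hne : cs.getD (q + 1) ' ' ≠ '\'' := by
        revert hpunc; simp [pvPunc]; rintro (h | h | h | h | h | h) <;> simp [h]
      have e1 : pvLp cs (q + 1 + 1) = ((q + 1 : Nat) : Int) := by rw [pvLp, if_pos hpunc]
      have e2 : pvLqA cs (q + 1 + 1) = pvLqA cs (q + 1) := by rw [pvLqA, if_neg (fun h => hne h.1)]
      rw [dif_neg (fun h => h.2 hpunc), e1, e2, if_neg (by omega)]
      simp
    · by_cases hquo : cs.getD (q + 1) ' ' = '\''
      · have e1 : pvLp cs (q + 1 + 1) = pvLp cs (q + 1) := by rw [pvLp, if_neg hpunc]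
        have e2 : pvLqA cs (q + 1 + 1) = ((q + 1 : Nat) : Int) := by rw [pvLqA, if_pos ⟨hquo, Nat.succ_pos q⟩]
        rw [dif_pos ⟨Nat.succ_pos q, hpunc⟩, if_pos hquo, e1, e2, if_pos (by omega)]
        simp
      · have e1 : pvLp cs (q + 1 + 1) = pvLp cs (q + 1) := by rw [pvLp, if_neg hpunc]
        have e2 : pvLqA cs (q + 1 + 1) = pvLqA cs (q + 1) := by rw [pvLqA, if_neg (fun h => hquo h.1)]
        rw [dif_pos ⟨Nat.succ_pos q, hpunc⟩, if_neg hquo, e1, e2, Nat.add_sub_cancel]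
        exact ih (by omega)

theorem pvOuterA_skip (cs : List Char) (i j : Nat) (kws : PySem.Set String)
    (hj : j < cs.length) (hc : cs.getD j ' ' ≠ ':') (hij : i ≤ j) :
    pvOuterA cs i j kws = pvOuterA cs i (j + 1) kws := by
  have hfc : pvFindColon cs j = pvFindColon cs (j + 1) := by
    conv_lhs => rw [pvFindColon]
    rw [dif_pos ⟨hj, hc⟩]
  by_cases hj1 : j + 1 < cs.length
  · conv_lhs => rw [pvOuterA]
    conv_rhs => rw [pvOuterA]
    rw [dif_pos ⟨by omega, hj⟩, dif_pos ⟨by omega, hj1⟩, hfc]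
  · have hfc2 : pvFindColon cs (j + 1) = j + 1 := by
      rw [pvFindColon, dif_neg (fun h => hj1 h.1)]
    conv_lhs => rw [pvOuterA]
    conv_rhs => rw [pvOuterA]
    rw [dif_pos ⟨by omega, hj⟩, dif_neg (fun h => hj1 h.2), hfc, hfc2]
    simp only []
    rw [if_neg (fun h => absurd h.1 (by omega)), pvOuterA,
      dif_neg (fun h => absurd h.1 (by omega : ¬ j + 1 < cs.length))]

theorem pvMain (cs : List Char) : ∀ (fuel i j : Nat) (kws : PySem.Set String),
    cs.length ≤ j + fuel → i ≤ j →
    pvOuterA cs i j kws = pvLoopB cs j (max (pvLp cs j) 0) (max (pvLq cs j) 0) kws := by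
  intro fuel
  induction fuel with
  | zero =>
    intro i j kws hf hij
    rw [pvOuterA, dif_neg (fun h => absurd h.2 (by omega)), pvLoopB, dif_neg (by omega)]
  | succ f ih =>
    intro i j kws hf hij
    by_cases hj : j < cs.length
    · by_cases hc : cs.getD j ' ' = ':'
      · -- current char is ':' : A's inner scans act here, B's ':' branch acts here
        have hfc : pvFindColon cs j = j := by rw [pvFindColon, dif_neg (fun h => h.2 hc)]
        have hqb := pvLqA_bounds cs j
        have hpb := pvLp_bounds cs j
        have hnp : cs.getD j ' ' ∉ pvPunc := by rw [hc]; decide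
        have hnq : cs.getD j ' ' ≠ '\'' := by rw [hc]; decide
        have e1 : pvLp cs (j + 1) = pvLp cs j := by rw [pvLp, if_neg hnp]
        have e2 : pvLqA cs (j + 1) = pvLqA cs j := by rw [pvLqA, if_neg (fun h => hnq h.1)]
        have e3 : pvLq cs (j + 1) = pvLq cs j := by rw [pvLq, if_neg hnq]
        have hback := pvBackA_eq cs j hj
        rw [e1, e2] at hback
        have hm := pvLq_max cs j
        have hrec := ih j (j + 1)
        conv_lhs => rw [pvOuterA]
        rw [dif_pos ⟨by omega, hj⟩]
        simp only [hfc]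
        rw [hrec _ (by omega) (Nat.le_succ j), e1, e3]
        conv_rhs => rw [pvLoopB]
        rw [dif_pos hj]
        simp only [hc, if_neg (show ¬ (':' : Char) ∈ pvPunc by decide),
          if_neg (show ¬ (':' : Char) = '\'' by decide), true_and]
        rw [← apply_ite (pvLoopB cs (j + 1) (max (pvLp cs j) 0) (max (pvLq cs j) 0)),
          ← apply_ite (pvLoopB cs (j + 1) (max (pvLp cs j) 0) (max (pvLq cs j) 0))]
        congr 1
        by_cases hcnd : j + 1 < cs.length ∧ PySem.List.pyGet? cs ((j : Int) - 1) ≠ some '"'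
        · rw [if_pos hcnd, if_pos hcnd]
          rcases pvLqA_pos cs j with hA | hA
          · -- no quote at positions 1..j-1: A never aborts, B's clamped state agrees
            rw [hA, if_neg (by omega : ¬ pvLp cs j < -1)] at hback
            rw [hback]
            have hA2 : ¬ ((((pvLp cs j).toNat, false) : Nat × Bool).2 = true) := by simp
            have hBle : max (pvLq cs j) 0 ≤ max (pvLp cs j) 0 := by omega
            rw [if_pos hA2, if_pos hBle,
              show (((pvLp cs j).toNat + 1 : Nat) : Int) = max (pvLp cs j) 0 + 1 by omega]
          · -- a quote after the last delimiter decides both the same way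
            by_cases hab : pvLp cs j < pvLqA cs j
            · rw [if_pos hab] at hback
              rw [hback]
              have hA2 : ¬ ¬ ((((pvLqA cs j).toNat, true) : Nat × Bool).2 = true) := by simp
              rw [if_neg hA2, if_neg (show ¬ max (pvLq cs j) 0 ≤ max (pvLp cs j) 0 by omega)]
            · rw [if_neg hab] at hback
              rw [hback]
              have hA2 : ¬ ((((pvLp cs j).toNat, false) : Nat × Bool).2 = true) := by simp
              rw [if_pos hA2, if_pos (show max (pvLq cs j) 0 ≤ max (pvLp cs j) 0 by omega),
                show (((pvLp cs j).toNat + 1 : Nat) : Int) = max (pvLp cs j) 0 + 1 by omega]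
        · rw [if_neg hcnd, if_neg hcnd]
      · -- not a ':' : A skips the position, B only updates its trackers
        rw [pvOuterA_skip cs i j kws hj hc hij, ih i (j + 1) kws (by omega) (by omega)]
        conv_rhs => rw [pvLoopB]
        rw [dif_pos hj]
        by_cases hpunc : cs.getD j ' ' ∈ pvPunc
        · have e1 : pvLp cs (j + 1) = (j : Int) := by rw [pvLp, if_pos hpunc]
          have hne : cs.getD j ' ' ≠ '\'' := by
            revert hpunc; simp [pvPunc]; rintro (h | h | h | h | h | h) <;> simp [h]
          have e3 : pvLq cs (j + 1) = pvLq cs j := by rw [pvLq, if_neg hne]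
          rw [e1, e3, if_pos hpunc, show max ((j : Nat) : Int) 0 = ((j : Nat) : Int) by omega]
        · by_cases hquo : cs.getD j ' ' = '\''
          · have e1 : pvLp cs (j + 1) = pvLp cs j := by rw [pvLp, if_neg hpunc]
            have e3 : pvLq cs (j + 1) = (j : Int) := by rw [pvLq, if_pos hquo]
            rw [e1, e3, if_neg hpunc, if_pos hquo,
              show max ((j : Nat) : Int) 0 = ((j : Nat) : Int) by omega]
          · have e1 : pvLp cs (j + 1) = pvLp cs j := by rw [pvLp, if_neg hpunc]
            have e3 : pvLq cs (j + 1) = pvLq cs j := by rw [pvLq, if_neg hquo]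
            rw [e1, e3, if_neg hpunc, if_neg hquo, if_neg (fun h => hc h.1)]
    · rw [pvOuterA, dif_neg (fun h => hj h.2), pvLoopB, dif_neg hj]

-- ===== VERDICT (by name: the statement is the Claim_ definition above) =====
theorem find_all_keywords_in_mongo_result_spec : Claim_equal_find_all_keywords_in_mongo_result := by
  intro s _
  have h := pvMain s.toList s.toList.length 0 0 PySem.Set.empty (by omega) (Nat.le_refl 0)
  simpa [find_all_keywords_in_mongo_result, find_all_keywords_in_mongo_result_alt,
    Spec_find_all_keywords_in_mongo_result, pvLp, pvLq] using h
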